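-- pv_equiv track=rewrite | github.com/mukmookk/algorithm | Programmers/level2/광물캐기.py | solution
-- ===== SOURCE A (Python) =====
-- def diamond_and_iron_counts(seq):
--     return seq[0], seq[1]
--
-- def diamond_and_iron_key(seq):
--     return diamond_and_iron_counts(seq)
--
-- def solution(picks, minerals):
--     answer = 0
--     upper_bound = 0
--     sequences = []
--
--     if sum(picks) * 5 < len(minerals):
--         minerals = minerals[0:sum(picks)*5]
--
--     while upper_bound < len(minerals):
--         upper_bound = upper_bound + 5 if upper_bound < len(minerals) else len(minerals)
--         sublist = minerals[upper_bound - 5: upper_bound]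
--         dia = sublist.count("diamond")
--         iron = sublist.count("iron")
--         stone = sublist.count("stone")
--         sequences.append([dia, iron, stone])
--
--     sorted_sequences = sorted(sequences, key=diamond_and_iron_key)
--     equipments = [[1, 1, 1], [5, 1, 1], [25, 5, 1]]
--     for i in range(picks[0]):
--         if sorted_sequences:
--             answer += sum([x * y for x, y in zip(equipments[0], sorted_sequences.pop())])
--
--     for i in range(picks[1]):
--         if sorted_sequences:
--             answer += sum([x * y for x, y in zip(equipments[1], sorted_sequences.pop())])
--
--     for i in range(picks[2]):
--         if sorted_sequences:
--             answer += sum([x * y for x, y in zip(equipments[2], sorted_sequences.pop())])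
--
--     return answer
-- ===== SOURCE B (Python) =====
-- def solution(picks, minerals):
--     total = sum(picks)
--     if total * 5 < len(minerals):
--         minerals = minerals[:total * 5]
--     # bucket (counting) sort: group key dia*6+iron in 0..35, no comparison sort needed
--     buckets = [[] for _ in range(36)]
--     for i in range(0, len(minerals), 5):
--         chunk = minerals[i:i + 5]
--         dia = chunk.count("diamond")
--         iron = chunk.count("iron")
--         stone = chunk.count("stone")
--         buckets[dia * 6 + iron].append([dia, iron, stone])
--     order = []
--     for k in range(35, -1, -1):
--         order.extend(reversed(buckets[k]))  # best groups first, matching pop-from-end order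
--     answer = 0
--     idx = 0
--     weights = [(1, 1, 1), (5, 1, 1), (25, 5, 1)]
--     for t in range(3):
--         a, b, c = weights[t]
--         take = max(0, min(picks[t], len(order) - idx))
--         answer += sum(g[0] * a + g[1] * b + g[2] * c for g in order[idx:idx + take])
--         idx += take
--     return answer
-- ===== Notes on version B (the rewrite author's own statement) =====
-- stated objective: faster
-- what changed: Replaces sorted(sequences, key=(dia,iron)) plus three per-pick pop loops by a 36-bucket counting sort keyed on dia*6+iron (buckets read from highest key down, each reversed, reproducing the stable pop-from-end order exactly) and one slice sum per pick tier instead of one list.pop per pick.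
import Mathlib
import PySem

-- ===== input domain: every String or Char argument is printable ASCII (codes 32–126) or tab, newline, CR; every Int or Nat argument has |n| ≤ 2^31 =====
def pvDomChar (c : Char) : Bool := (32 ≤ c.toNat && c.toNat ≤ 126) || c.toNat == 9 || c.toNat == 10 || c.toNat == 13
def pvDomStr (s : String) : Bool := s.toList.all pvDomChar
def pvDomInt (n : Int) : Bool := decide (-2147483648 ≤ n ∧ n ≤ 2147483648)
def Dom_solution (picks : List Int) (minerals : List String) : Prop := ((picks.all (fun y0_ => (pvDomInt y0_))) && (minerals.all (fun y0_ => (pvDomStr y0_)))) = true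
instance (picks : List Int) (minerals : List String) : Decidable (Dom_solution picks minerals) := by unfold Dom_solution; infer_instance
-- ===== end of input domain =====

-- B replaces A's comparison sort of the 5-mineral groups by a 36-way bucket (counting) sort
-- keyed on dia*6+iron and consumes the bucket order with slice sums instead of per-pick pops
-- (objective: faster — measured; neither program mutates its arguments).

-- ===== PORT A =====
-- seq[0]/seq[1] via pyGet?; the default is never used: solution only applies it to length-3 rows.
def diamondAndIronCounts (seq : List Int) : Int × Int :=
  ((PySem.List.pyGet? seq 0).getD 0, (PySem.List.pyGet? seq 1).getD 0)

def diamondAndIronKey (seq : List Int) : Int × Int := diamondAndIronCounts seq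

-- the while-loop building `sequences`; `upper_bound + 5 if upper_bound < len(minerals) else len(minerals)`:
-- the else-branch is dead (the loop just tested upper_bound < len(minerals)).
def chunkRows (minerals : List String) (ub : Nat) : List (List Int) :=
  if _h : ub < minerals.length then
    let ub' := ub + 5
    let sub := PySem.List.slice minerals (some ((ub' : Int) - 5)) (some (ub' : Int))
    let dia : Int := (PySem.List.count sub "diamond" : Nat)
    let iron : Int := (PySem.List.count sub "iron" : Nat)
    let stone : Int := (PySem.List.count sub "stone" : Nat)
    [dia, iron, stone] :: chunkRows minerals ub'
  else []
termination_by minerals.length - ub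
decreasing_by omega

-- answer += sum([x * y for x, y in zip(equipments[t], seq)])
def dotA (w seq : List Int) : Int := ((w.zip seq).map (fun p => p.1 * p.2)).sum

-- one iteration of `if sorted_sequences: answer += …pop()` (pop? is none exactly when the list is empty)
def popStep (w : List Int) (st : Int × List (List Int)) : Int × List (List Int) :=
  match PySem.List.pop? st.2 with
  | some (g, rest) => (st.1 + dotA w g, rest)
  | none => st

def solution (picks : List Int) (minerals : List String) : Int :=
  let minerals' := if picks.sum * 5 < (minerals.length : Int)
    then PySem.List.slice minerals (some 0) (some (picks.sum * 5)) else minerals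
  let seqs := chunkRows minerals' 0
  let sortedSeqs := PySem.List.sorted2 seqs (fun s => (diamondAndIronKey s).1) (fun s => (diamondAndIronKey s).2)
  let equipments : List (List Int) := [[1, 1, 1], [5, 1, 1], [25, 5, 1]]
  let st1 := (PySem.List.pyRange 0 (PySem.List.pyGetD picks 0 0) 1).foldl
      (fun st _ => popStep (PySem.List.pyGetD equipments 0 []) st) (0, sortedSeqs)
  let st2 := (PySem.List.pyRange 0 (PySem.List.pyGetD picks 1 0) 1).foldl
      (fun st _ => popStep (PySem.List.pyGetD equipments 1 []) st) st1
  let st3 := (PySem.List.pyRange 0 (PySem.List.pyGetD picks 2 0) 1).foldl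
      (fun st _ => popStep (PySem.List.pyGetD equipments 2 []) st) st2
  st3.1

-- ===== PORT B =====
-- the `for i in range(0, len(minerals), 5):` chunk-and-bucket loop;
-- buckets[dia*6+iron].append([dia,iron,stone]).
-- (.toNat on the bucket index is safe: counts are ≥ 0, so the Int index is ≥ 0; and it is < 36.)
def fillBuckets (minerals : List String) (bs : List (List (List Int))) : List (List (List Int)) :=
  (PySem.List.pyRange 0 (minerals.length : Int) 5).foldl (fun bs i =>
    let chunk := PySem.List.slice minerals (some i) (some (i + 5))
    let dia : Int := (PySem.List.count chunk "diamond" : Nat)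
    let iron : Int := (PySem.List.count chunk "iron" : Nat)
    let stone : Int := (PySem.List.count chunk "stone" : Nat)
    bs.modify (dia * 6 + iron).toNat (fun b => b ++ [[dia, iron, stone]])) bs

-- for k in range(35, -1, -1): order.extend(reversed(buckets[k]))
def bucketOrder (bs : List (List (List Int))) : List (List Int) :=
  (PySem.List.pyRange 35 (-1) (-1)).foldl (fun acc k => acc ++ (bs.getD k.toNat []).reverse) []

-- sum(g[0]*a + g[1]*b + g[2]*c for g in <slice>)
def wsumB (w : Int × Int × Int) (gs : List (List Int)) : Int :=
  (gs.map (fun g => PySem.List.pyGetD g 0 0 * w.1 + PySem.List.pyGetD g 1 0 * w.2.1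
      + PySem.List.pyGetD g 2 0 * w.2.2)).sum

def solution_alt (picks : List Int) (minerals : List String) : Int :=
  let total := picks.sum
  let minerals' := if total * 5 < (minerals.length : Int)
    then PySem.List.slice minerals none (some (total * 5)) else minerals
  let bs := fillBuckets minerals' (List.replicate 36 [])
  let order := bucketOrder bs
  let weights : List (Int × Int × Int) := [(1, 1, 1), (5, 1, 1), (25, 5, 1)]
  let fin := (PySem.List.pyRange 0 3 1).foldl (fun st t =>
      let w := PySem.List.pyGetD weights t (0, 0, 0)
      let take := max 0 (min (PySem.List.pyGetD picks t 0) ((order.length : Int) - st.2))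
      (st.1 + wsumB w (PySem.List.slice order (some st.2) (some (st.2 + take))), st.2 + take))
    ((0 : Int), (0 : Int))
  fin.1

-- ===== PRECONDITION & SPEC =====
-- A evaluates picks[0], picks[1], picks[2]; with fewer than 3 picks it raises IndexError (so does B).
def Pre_solution (picks : List Int) (minerals : List String) : Prop := 3 ≤ picks.length
instance (picks : List Int) (minerals : List String) : Decidable (Pre_solution picks minerals) := by
  unfold Pre_solution; infer_instance

def pvWitness_solution : List Int × List String :=
  ([1, 1, 1], ["diamond", "iron", "stone", "stone", "stone", "iron"])

def Spec_solution (picks : List Int) (minerals : List String) (out : Int) : Prop := out = solution_alt picks minerals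
instance (picks : List Int) (minerals : List String) (out : Int) : Decidable (Spec_solution picks minerals out) := by unfold Spec_solution; infer_instance

-- ===== CLAIM (what is proved, stated in full; the proofs are below) =====
def Claim_equal_solution : Prop := ∀ (picks : List Int) (minerals : List String), Dom_solution picks minerals → Pre_solution picks minerals → Spec_solution picks minerals (solution picks minerals)

-- ===== LEMMAS AND PROOFS =====

-- a row [dia, iron, stone] with its count bounds
def RowP (g : List Int) : Prop :=
  ∃ d i s : Int, g = [d, i, s] ∧ 0 ≤ d ∧ d ≤ 5 ∧ 0 ≤ i ∧ i ≤ 5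

-- bucket key of a row
def keyRow (g : List Int) : Nat :=
  ((PySem.List.pyGetD g 0 0) * 6 + PySem.List.pyGetD g 1 0).toNat

-- chunking expressed structurally (both ports' chunk loops compute it)
def chunkList (m : List String) : List (List Int) :=
  if _h : m ≠ [] then
    let chunk := m.take 5
    (([(PySem.List.count chunk "diamond" : Nat), (PySem.List.count chunk "iron" : Nat),
       (PySem.List.count chunk "stone" : Nat)] : List Int)) :: chunkList (m.drop 5)
  else []
termination_by m.length
decreasing_by
  have hne : m ≠ [] := by assumption
  cases m with
  | nil => exact absurd rfl hne
  | cons a t => simp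

def sumA (w : List Int) (gs : List (List Int)) : Int := (gs.map (dotA w)).sum

-- A's sort comparator (from sorted2)
def beforeA (a b : List Int) : Bool :=
  decide ((diamondAndIronKey a).1 < (diamondAndIronKey b).1)
    || (!decide ((diamondAndIronKey b).1 < (diamondAndIronKey a).1)
        && decide ((diamondAndIronKey a).2 < (diamondAndIronKey b).2))

lemma chunkRows_eq_chunkList (m : List String) (ub : Nat) :
    chunkRows m ub = chunkList (m.drop ub) := by
  by_cases h : ub < m.length
  · have hd : m.drop ub ≠ [] := by
      simp only [ne_eq, List.drop_eq_nil_iff]; omega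
    rw [chunkRows, chunkList]
    simp only [dif_pos h, dif_pos hd]
    have hcast : ((↑(ub + 5) : Int) - 5) = ((↑ub : Nat) : Int) := by push_cast; ring
    have hs : PySem.List.slice m (some ((↑(ub + 5) : Int) - 5)) (some (↑(ub + 5) : Int))
        = (m.drop ub).take 5 := by
      rw [hcast, PySem.List.slice_natCast m ub (ub + 5)]
      congr 1
      omega
    rw [hs, chunkRows_eq_chunkList m (ub + 5), List.drop_drop]
  · rw [chunkRows, chunkList]
    have hd : m.drop ub = [] := by
      simp only [List.drop_eq_nil_iff]; omega
    simp [h, hd]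
termination_by m.length - ub

lemma rowP_chunkList (m : List String) : ∀ g ∈ chunkList m, RowP g := by
  intro g hg
  rw [chunkList] at hg
  by_cases h : m ≠ []
  · simp only [dif_pos h, List.mem_cons] at hg
    rcases hg with hg | hg
    · refine ⟨_, _, _, hg, ?_, ?_, ?_, ?_⟩ <;>
      · simp only [PySem.List.count_eq]
        have h1 := List.count_le_length (l := m.take 5) (a := "diamond")
        have h2 := List.count_le_length (l := m.take 5) (a := "iron")
        have h3 := List.length_take_le 5 m
        omega
    · exact rowP_chunkList (m.drop 5) g hg
  · simp only [dif_neg h] at hg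
    exact absurd hg (List.not_mem_nil)
termination_by m.length
decreasing_by
  cases m with
  | nil => simp_all
  | cons a t => simp

lemma keyRow_cons (d i s : Int) : keyRow [d, i, s] = (d * 6 + i).toNat := by
  simp [keyRow, pysem]

lemma pyRange_five_nil (a b : Int) (h : b ≤ a) : PySem.List.pyRange a b 5 = [] := by
  rw [PySem.List.pyRange_of_pos _ _ (by norm_num)]
  rw [if_neg (by omega)]
  simp

lemma pyRange_five_cons (a b : Int) (h : a < b) :
    PySem.List.pyRange a b 5 = a :: PySem.List.pyRange (a + 5) b 5 := by
  rw [PySem.List.pyRange_of_pos _ _ (by norm_num), PySem.List.pyRange_of_pos _ _ (by norm_num)]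
  rw [if_pos h]
  by_cases h2 : a + 5 < b
  · rw [if_pos h2,
      show ((b - a + 5 - 1) / 5).toNat = ((b - (a + 5) + 5 - 1) / 5).toNat + 1 from by omega,
      List.range_succ_eq_map, List.map_cons, List.map_map]
    congr 1
    · simp
    · apply List.map_congr_left
      intro k _
      simp only [Function.comp_apply]
      push_cast
      ring
  · rw [if_neg h2, show ((b - a + 5 - 1) / 5).toNat = 1 from by omega]
    simp

lemma fillFold_eq (m : List String) (ub : Nat) (bs : List (List (List Int))) :
    (PySem.List.pyRange (ub : Int) (m.length : Int) 5).foldl (fun bs i =>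
        let chunk := PySem.List.slice m (some i) (some (i + 5))
        let dia : Int := (PySem.List.count chunk "diamond" : Nat)
        let iron : Int := (PySem.List.count chunk "iron" : Nat)
        let stone : Int := (PySem.List.count chunk "stone" : Nat)
        bs.modify (dia * 6 + iron).toNat (fun b => b ++ [[dia, iron, stone]])) bs
      = (chunkList (m.drop ub)).foldl (fun bs g => bs.modify (keyRow g) (· ++ [g])) bs := by
  by_cases h : ub < m.length
  · have hd : m.drop ub ≠ [] := by
      simp only [ne_eq, List.drop_eq_nil_iff]; omega
    rw [pyRange_five_cons _ _ (by exact_mod_cast h), chunkList]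
    simp only [dif_pos hd, List.foldl_cons]
    have hs : PySem.List.slice m (some (ub : Int)) (some ((ub : Int) + 5))
        = (m.drop ub).take 5 := by
      rw [show ((ub : Int) + 5) = ((ub : Int) + ((5 : Nat) : Int)) from rfl,
        PySem.List.slice_natCast_add]
    rw [hs, show ((ub : Int) + 5) = (((ub + 5 : Nat) : Int)) from by push_cast; ring,
      fillFold_eq m (ub + 5), keyRow_cons, ← List.drop_drop]
  · rw [pyRange_five_nil _ _ (by exact_mod_cast Nat.le_of_not_lt h)]
    have hd : m.drop ub = [] := by
      simp only [List.drop_eq_nil_iff]; omega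
    rw [hd, chunkList]
    simp
termination_by m.length - ub

lemma fillBuckets_eq_foldl (m : List String) (bs : List (List (List Int))) :
    fillBuckets m bs = (chunkList m).foldl (fun bs g => bs.modify (keyRow g) (· ++ [g])) bs := by
  rw [fillBuckets, show (0 : Int) = ((0 : Nat) : Int) from rfl, fillFold_eq m 0 bs,
    List.drop_zero]

lemma diamondAndIronKey_cons (d i s : Int) : diamondAndIronKey [d, i, s] = (d, i) := by
  simp [diamondAndIronKey, diamondAndIronCounts, pysem]

lemma beforeA_eq_key (a b : List Int) (ha : RowP a) (hb : RowP b) :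
    beforeA a b = decide (keyRow a < keyRow b) := by
  obtain ⟨d, i, s, rfl, hd0, hd5, hi0, hi5⟩ := ha
  obtain ⟨d', i', s', rfl, hd0', hd5', hi0', hi5'⟩ := hb
  rw [beforeA, keyRow_cons, keyRow_cons, diamondAndIronKey_cons, diamondAndIronKey_cons]
  by_cases h1 : d < d' <;> by_cases h2 : d' < d <;> by_cases h3 : i < i' <;>
    simp [h1, h2, h3] <;> omega

lemma mem_flatten_getD {α : Type} (bs : List (List α)) (g : α) :
    g ∈ bs.flatten ↔ ∃ i, g ∈ bs.getD i [] := by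
  rw [List.mem_flatten]
  constructor
  · rintro ⟨l, hl, hg⟩
    obtain ⟨i, hi, rfl⟩ := List.mem_iff_getElem.mp hl
    refine ⟨i, ?_⟩
    rwa [List.getD_eq_getElem?_getD, List.getElem?_eq_getElem hi]
  · rintro ⟨i, hi⟩
    by_cases h : i < bs.length
    · refine ⟨bs[i], List.getElem_mem _, ?_⟩
      rwa [List.getD_eq_getElem?_getD, List.getElem?_eq_getElem h] at hi
    · rw [List.getD_eq_getElem?_getD, List.getElem?_eq_none (by omega)] at hi
      simp at hi

lemma insertBy_prefix {α : Type} (before : α → α → Bool) (x : α) (pre suf : List α)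
    (h : ∀ y ∈ pre, before x y = false) :
    PySem.List.insertBy before x (pre ++ suf) = pre ++ PySem.List.insertBy before x suf := by
  induction pre with
  | nil => simp
  | cons y ys ih =>
    have hy : before x y = false := h y (by simp)
    have step : ∀ t : List α, PySem.List.insertBy before x (y :: t)
        = y :: PySem.List.insertBy before x t := by
      intro t; simp [PySem.List.insertBy, hy]
    rw [List.cons_append, step, ih (fun z hz => h z (by simp [hz])), List.cons_append]

lemma insertBy_front {α : Type} (before : α → α → Bool) (x : α) (suf : List α)
    (h : ∀ y ∈ suf, before x y = true) :
    PySem.List.insertBy before x suf = x :: suf := by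
  cases suf with
  | nil => simp [PySem.List.insertBy]
  | cons y ys => simp [PySem.List.insertBy, h y (by simp)]

lemma keyRow_lt_36 (g : List Int) (h : RowP g) : keyRow g < 36 := by
  obtain ⟨d, i, s, rfl, hd0, hd5, hi0, hi5⟩ := h
  rw [keyRow_cons]
  omega

lemma insert_bucket (bs : List (List (List Int))) (off j : Nat) (x : List Int)
    (hb : ∀ i g, g ∈ bs.getD i [] → RowP g ∧ keyRow g = off + i)
    (hx : RowP x) (hxk : keyRow x = off + j) (hj : j < bs.length) :
    PySem.List.insertBy beforeA x bs.flatten = (bs.modify j (· ++ [x])).flatten := by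
  induction bs generalizing off j with
  | nil => simp at hj
  | cons b rest ih =>
    have hbmem : ∀ y ∈ b, RowP y ∧ keyRow y = off := by
      intro y hy
      simpa using hb 0 y (by simpa using hy)
    cases j with
    | zero =>
      have hpre : ∀ y ∈ b, beforeA x y = false := by
        intro y hy
        rw [beforeA_eq_key x y hx (hbmem y hy).1, (hbmem y hy).2, hxk]
        simp
      have hsuf : ∀ y ∈ rest.flatten, beforeA x y = true := by
        intro y hy
        obtain ⟨i, hi⟩ := (mem_flatten_getD rest y).mp hy
        have hyk := hb (i + 1) y (by simpa using hi)
        rw [beforeA_eq_key x y hx hyk.1, hyk.2, hxk]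
        simp
      rw [List.flatten_cons, insertBy_prefix _ _ _ _ hpre, insertBy_front _ _ _ hsuf]
      simp [List.modify]
    | succ j' =>
      have hpre : ∀ y ∈ b, beforeA x y = false := by
        intro y hy
        rw [beforeA_eq_key x y hx (hbmem y hy).1, (hbmem y hy).2, hxk]
        simp
      have hb' : ∀ i g, g ∈ rest.getD i [] → RowP g ∧ keyRow g = (off + 1) + i := by
        intro i g hg
        have := hb (i + 1) g (by simpa using hg)
        exact ⟨this.1, by omega⟩
      rw [List.flatten_cons, insertBy_prefix _ _ _ _ hpre,
        ih (off + 1) j' hb' (by omega) (by simpa using hj)]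
      simp [List.modify]

lemma getD_modify {α : Type} (bs : List (List α)) (j : Nat) (f : List α → List α) (i : Nat)
    (hj : j < bs.length) :
    (bs.modify j f).getD i [] = if i = j then f (bs.getD j []) else bs.getD i [] := by
  rw [List.getD_eq_getElem?_getD, List.getElem?_modify]
  by_cases hij : i = j
  · subst hij
    rw [List.getElem?_eq_getElem hj]
    simp [List.getD_eq_getElem?_getD, List.getElem?_eq_getElem hj]
  · have : ¬ (j = i) := fun h => hij h.symm
    simp only [this, if_neg hij]
    cases e : bs[i]? <;> simp [List.getD_eq_getElem?_getD, e]

lemma fold_insert_buckets (seqs : List (List Int)) (bs : List (List (List Int)))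
    (hrows : ∀ g ∈ seqs, RowP g) (hlen : bs.length = 36)
    (hb : ∀ i g, g ∈ bs.getD i [] → RowP g ∧ keyRow g = i) :
    seqs.foldl (fun acc x => PySem.List.insertBy beforeA x acc) bs.flatten
      = ((seqs.foldl (fun bs g => bs.modify (keyRow g) (· ++ [g])) bs)).flatten := by
  induction seqs generalizing bs with
  | nil => simp
  | cons g gs ih =>
    have hg : RowP g := hrows g (by simp)
    have hk : keyRow g < 36 := keyRow_lt_36 g hg
    simp only [List.foldl_cons]
    rw [insert_bucket bs 0 (keyRow g) g (fun i y hy => by simpa using hb i y hy) hg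
      (by omega) (by omega)]
    apply ih _ (fun y hy => hrows y (by simp [hy])) (by simpa using hlen)
    intro i y hy
    rw [getD_modify _ _ _ _ (by omega)] at hy
    by_cases hik : i = keyRow g
    · subst hik
      rw [if_pos rfl] at hy
      rcases List.mem_append.mp hy with hy | hy
      · exact hb _ y hy
      · simp only [List.mem_singleton] at hy
        subst hy
        exact ⟨hg, rfl⟩
    · rw [if_neg hik] at hy
      exact hb i y hy

lemma sorted_eq_flatten (seqs : List (List Int)) (hrows : ∀ g ∈ seqs, RowP g) :
    PySem.List.sorted2 seqs (fun s => (diamondAndIronKey s).1) (fun s => (diamondAndIronKey s).2)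
      = ((seqs.foldl (fun bs g => bs.modify (keyRow g) (· ++ [g])) (List.replicate 36 []))).flatten := by
  have h0 : PySem.List.sorted2 seqs (fun s => (diamondAndIronKey s).1)
      (fun s => (diamondAndIronKey s).2)
      = seqs.foldl (fun acc x => PySem.List.insertBy beforeA x acc)
          ((List.replicate 36 ([] : List (List Int))).flatten) := by
    simp only [PySem.List.sorted2, List.flatten_replicate_nil]
    rfl
  rw [h0]
  apply fold_insert_buckets seqs _ hrows (by simp)
  intro i g hg
  rcases Nat.lt_or_ge i 36 with h | h
  · rw [List.getD_eq_getElem?_getD, List.getElem?_eq_getElem (by simpa using h),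
      List.getElem_replicate] at hg
    simp at hg
  · rw [List.getD_eq_getElem?_getD, List.getElem?_eq_none (by simpa using h)] at hg
    simp at hg

lemma flatMap_range_getD {α : Type} (n : Nat) (bs : List (List α)) (h : bs.length = n) :
    (List.range n).flatMap (fun k => bs.getD k []) = bs.flatten := by
  induction bs generalizing n with
  | nil => subst h; simp
  | cons b rest ih =>
    subst h
    rw [List.length_cons, List.range_succ_eq_map, List.flatMap_cons, List.flatMap_map]
    simp only [List.getD_cons_zero, List.getD_cons_succ]
    rw [ih rest.length rfl, List.flatten_cons]

lemma bucketOrder_eq_reverse (bs : List (List (List Int))) (hlen : bs.length = 36) :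
    bucketOrder bs = bs.flatten.reverse := by
  rw [bucketOrder, PySem.List.pyRange_neg_one_eq_reverse,
    show ((-1 : Int) + 1) = 0 from rfl, show ((35 : Int) + 1) = 36 from rfl]
  rw [PySem.List.foldl_append_eq_flatMap]
  rw [List.nil_append]
  rw [show (fun k : Int => (bs.getD k.toNat []).reverse)
      = (List.reverse ∘ fun k : Int => bs.getD k.toNat []) from rfl, ← List.reverse_flatMap]
  rw [PySem.List.pyRange_one 0 36, List.flatMap_map]
  have h1 : (fun a : Nat => bs.getD ((0 : Int) + ↑a).toNat []) = fun k : Nat => bs.getD k [] := by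
    funext k
    simp
  rw [h1, show ((36 : Int) - 0).toNat = 36 from rfl, flatMap_range_getD 36 bs hlen]

lemma foldl_const_iterate {α β : Type} (l : List β) (f : α → α) (init : α) :
    l.foldl (fun st _ => f st) init = f^[l.length] init := by
  induction l generalizing init with
  | nil => rfl
  | cons x t ih => simp [ih, Function.iterate_succ_apply]

lemma iter_popStep (w : List Int) (c : Nat) (ans : Int) (r : List (List Int)) :
    (popStep w)^[c] (ans, r.reverse) = (ans + sumA w (r.take c), (r.drop c).reverse) := by
  induction c generalizing ans r with
  | zero => simp [sumA]
  | succ c ih =>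
    rw [Function.iterate_succ_apply]
    cases r with
    | nil =>
      rw [show popStep w (ans, ([] : List (List Int)).reverse) = (ans, ([] : List (List Int)).reverse)
        from by simp [popStep, PySem.List.pop?]]
      rw [ih]
      simp [sumA]
    | cons g t =>
      rw [List.reverse_cons,
        show popStep w (ans, t.reverse ++ [g]) = (ans + dotA w g, t.reverse)
          from by simp [popStep, PySem.List.pop?_last],
        ih (ans + dotA w g) t]
      simp only [List.take_succ_cons, List.drop_succ_cons, sumA, List.map_cons, List.sum_cons,
        Prod.mk.injEq]
      constructor
      · ring
      · trivial

lemma foldl_modify_length (gs : List (List Int)) (bs : List (List (List Int))) :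
    (gs.foldl (fun bs g => bs.modify (keyRow g) (· ++ [g])) bs).length = bs.length := by
  induction gs generalizing bs with
  | nil => rfl
  | cons g t ih => simp [ih]

lemma sumA_eq_wsumB (wA : List Int) (wB : Int × Int × Int)
    (hw : ∀ d i s : Int, dotA wA [d, i, s] = d * wB.1 + i * wB.2.1 + s * wB.2.2)
    (gs : List (List Int)) (hrows : ∀ g ∈ gs, RowP g) :
    sumA wA gs = wsumB wB gs := by
  induction gs with
  | nil => rfl
  | cons g t ih =>
    obtain ⟨d, i, s, rfl, -, -, -, -⟩ := hrows g (by simp)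
    simp only [sumA, wsumB, List.map_cons, List.sum_cons] at *
    rw [hw d i s]
    have e0 : PySem.List.pyGetD [d, i, s] (0 : Int) 0 = d := by simp [pysem]
    have e1 : PySem.List.pyGetD [d, i, s] (1 : Int) 0 = i := by simp [pysem]
    have e2 : PySem.List.pyGetD [d, i, s] (2 : Int) 0 = s := by simp [pysem]
    rw [e0, e1, e2, ih (fun y hy => hrows y (by simp [hy]))]

lemma take_clamp {α : Type} (l : List α) (c : Nat) : l.take (min c l.length) = l.take c := by
  rcases le_total c l.length with h | h
  · rw [min_eq_left h]
  · rw [min_eq_right h, List.take_of_length_le h, List.take_length]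

lemma phase_eq (wA : List Int) (wB : Int × Int × Int)
    (hw : ∀ d i s : Int, dotA wA [d, i, s] = d * wB.1 + i * wB.2.1 + s * wB.2.2)
    (n ans idx : Int) (order : List (List Int))
    (hrows : ∀ g ∈ order, RowP g) (h0 : 0 ≤ idx) (hle : idx ≤ (order.length : Int)) :
    (popStep wA)^[n.toNat] (ans, (order.drop idx.toNat).reverse)
      = (ans + wsumB wB (PySem.List.slice order (some idx)
            (some (idx + max 0 (min n ((order.length : Int) - idx))))),
         (order.drop ((idx + max 0 (min n ((order.length : Int) - idx))).toNat)).reverse) := by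
  set tk := max 0 (min n ((order.length : Int) - idx)) with htk
  have htk0 : 0 ≤ tk := le_max_left _ _
  rw [iter_popStep]
  have hslice : PySem.List.slice order (some idx) (some (idx + tk))
      = (order.drop idx.toNat).take ((idx + tk).toNat - idx.toNat) :=
    PySem.List.slice_toNat order h0 (by omega)
  have harith : (idx + tk).toNat - idx.toNat = min n.toNat (order.drop idx.toNat).length := by
    simp only [List.length_drop]
    omega
  refine Prod.ext ?_ ?_
  · simp only
    rw [hslice, harith, take_clamp]
    congr 1
    refine sumA_eq_wsumB wA wB hw _ (fun y hy => hrows y ?_)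
    exact List.mem_of_mem_drop (List.mem_of_mem_take hy)
  · simp only
    congr 1
    rw [List.drop_drop]
    by_cases h : n.toNat ≤ order.length - idx.toNat
    · congr 1
      omega
    · rw [List.drop_eq_nil_of_le (by omega), List.drop_eq_nil_of_le (by omega)]

-- ===== VERDICT (by name: the statement is the Claim_ definition above) =====
theorem solution_spec : Claim_equal_solution := by
  intro picks minerals _dom _hpre
  unfold Spec_solution
  simp only [solution, solution_alt, PySem.List.slice_zero_start]
  set m' := (if picks.sum * 5 < ((minerals.length : Nat) : Int)
    then PySem.List.slice minerals none (some (picks.sum * 5)) else minerals) with hm'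
  have hseq : chunkRows m' 0 = chunkList m' := by
    rw [chunkRows_eq_chunkList, List.drop_zero]
  have hrows : ∀ g ∈ chunkList m', RowP g := rowP_chunkList m'
  set seqs := chunkList m' with hseqs
  set bsF := seqs.foldl (fun bs g => bs.modify (keyRow g) (· ++ [g]))
      (List.replicate 36 ([] : List (List Int))) with hbsF
  have hlen : bsF.length = 36 := by
    rw [hbsF, foldl_modify_length]
    simp
  have hfill : fillBuckets m' (List.replicate 36 []) = bsF := by
    rw [fillBuckets_eq_foldl, hbsF]
  have hord : bucketOrder bsF = bsF.flatten.reverse := bucketOrder_eq_reverse bsF hlen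
  have hsort : PySem.List.sorted2 seqs (fun s => (diamondAndIronKey s).1)
      (fun s => (diamondAndIronKey s).2) = bsF.flatten := sorted_eq_flatten seqs hrows
  set ord := bsF.flatten.reverse with hordd
  have hrowsOrd : ∀ g ∈ ord, RowP g := by
    intro g hg
    have hmem : g ∈ bsF.flatten := by
      rw [hordd] at hg
      exact List.mem_reverse.mp hg
    have hperm : (PySem.List.sorted2 seqs (fun s => (diamondAndIronKey s).1)
        (fun s => (diamondAndIronKey s).2)).Perm seqs := PySem.List.sorted2_perm _ _ _ false
    rw [hsort] at hperm
    exact hrows g (hperm.mem_iff.mp hmem)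
  have hinit : bsF.flatten = (ord.drop ((0 : Int)).toNat).reverse := by
    rw [hordd]
    simp
  have hw1 : ∀ d i s : Int, dotA [1, 1, 1] [d, i, s]
      = d * ((1, 1, 1) : Int × Int × Int).1 + i * ((1, 1, 1) : Int × Int × Int).2.1
        + s * ((1, 1, 1) : Int × Int × Int).2.2 := by
    intro d i s
    simp [dotA]
    ring
  have hw2 : ∀ d i s : Int, dotA [5, 1, 1] [d, i, s]
      = d * ((5, 1, 1) : Int × Int × Int).1 + i * ((5, 1, 1) : Int × Int × Int).2.1
        + s * ((5, 1, 1) : Int × Int × Int).2.2 := by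
    intro d i s
    simp [dotA]
    ring
  have hw3 : ∀ d i s : Int, dotA [25, 5, 1] [d, i, s]
      = d * ((25, 5, 1) : Int × Int × Int).1 + i * ((25, 5, 1) : Int × Int × Int).2.1
        + s * ((25, 5, 1) : Int × Int × Int).2.2 := by
    intro d i s
    simp [dotA]
    ring
  rw [hseq, hsort, hfill, hord, hinit]
  have hA0 : PySem.List.pyGetD [[1, 1, 1], [5, 1, 1], [25, 5, 1]] (0 : Int) ([] : List Int)
      = [1, 1, 1] := by decide
  have hA1 : PySem.List.pyGetD [[1, 1, 1], [5, 1, 1], [25, 5, 1]] (1 : Int) ([] : List Int)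
      = [5, 1, 1] := by decide
  have hA2 : PySem.List.pyGetD [[1, 1, 1], [5, 1, 1], [25, 5, 1]] (2 : Int) ([] : List Int)
      = [25, 5, 1] := by decide
  have hB0 : PySem.List.pyGetD [((1 : Int), (1 : Int), (1 : Int)), (5, 1, 1), (25, 5, 1)] (0 : Int)
      (0, 0, 0) = (1, 1, 1) := by decide
  have hB1 : PySem.List.pyGetD [((1 : Int), (1 : Int), (1 : Int)), (5, 1, 1), (25, 5, 1)] (1 : Int)
      (0, 0, 0) = (5, 1, 1) := by decide
  have hB2 : PySem.List.pyGetD [((1 : Int), (1 : Int), (1 : Int)), (5, 1, 1), (25, 5, 1)] (2 : Int)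
      (0, 0, 0) = (25, 5, 1) := by decide
  rw [hA0, hA1, hA2]
  rw [show PySem.List.pyRange 0 3 1 = [0, 1, 2] from by decide]
  simp only [List.foldl_cons, List.foldl_nil, hB0, hB1, hB2]
  rw [foldl_const_iterate, foldl_const_iterate, foldl_const_iterate,
    PySem.List.length_pyRange_one, PySem.List.length_pyRange_one, PySem.List.length_pyRange_one]
  simp only [sub_zero]
  have hL : (0 : Int) ≤ (ord.length : Int) := by positivity
  rw [phase_eq [1, 1, 1] (1, 1, 1) hw1 (PySem.List.pyGetD picks 0 0) 0 0 ord hrowsOrd le_rfl hL]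
  rw [phase_eq [5, 1, 1] (5, 1, 1) hw2 (PySem.List.pyGetD picks 1 0) _ _ ord hrowsOrd
    (by omega) (by omega)]
  rw [phase_eq [25, 5, 1] (25, 5, 1) hw3 (PySem.List.pyGetD picks 2 0) _ _ ord hrowsOrd
    (by omega) (by omega)]
  rfl
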